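-- pv_equiv track=rewrite | github.com/crmin/sla235-intro-dh | wikis.py | _toc_without_title
-- ===== SOURCE A (Python) =====
-- import string
--
-- def _toc_without_title(md_body: str) -> str:
--     """Table of Contents title 없이 바로 목차 리스트가 시작하는 경우에 대한 파싱
--
--     Args:
--         md_body (str): page markdown body
--
--     Returns:
--         str: 목차 문자열 (markdown)
--     """
--     tocs = []
--     toc_start = False  # list가 끝나면 중단하도록 하기 위한 flag
--     for line in md_body.split('\n'):
--         line = line.strip()
--         if len(line) > 0 and line[0] in ('*', '-', '+') + tuple(string.digits):  # list in markdown
--             # *, -, +: ul / 0, 1, 2, .., 9: ol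
--             tocs.append(line)
--             if not toc_start:
--                 toc_start = True  # list가 시작되면 flag를 True로 변경
--         elif toc_start:  # list가 시작되었는데 지금 읽은 문자열이 list가 아니라면 toc가 종료되었다고 판단
--             break
--     return '\n'.join(tocs).strip()
-- ===== SOURCE B (Python) =====
-- import string
-- from itertools import groupby
--
--
-- def _is_list(line: str) -> bool:
--     return len(line) > 0 and line[0] in '*-+' + string.digits
--
--
-- def _toc_without_title(md_body: str) -> str:
--     stripped = (line.strip() for line in md_body.split('\n'))
--     for is_run_of_lists, run in groupby(stripped, key=_is_list):
--         if is_run_of_lists: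
--             return '\n'.join(run).strip()
--     return ''
-- ===== Notes on version B (the rewrite author's own statement) =====
-- stated objective: alternative
-- what changed: Replaces A's stateful flag-loop (accumulator + toc_start flag + break) with an itertools.groupby decomposition: the stripped lines are grouped into maximal runs by the is-list predicate and the first run with key True is joined and returned.
import Mathlib
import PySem

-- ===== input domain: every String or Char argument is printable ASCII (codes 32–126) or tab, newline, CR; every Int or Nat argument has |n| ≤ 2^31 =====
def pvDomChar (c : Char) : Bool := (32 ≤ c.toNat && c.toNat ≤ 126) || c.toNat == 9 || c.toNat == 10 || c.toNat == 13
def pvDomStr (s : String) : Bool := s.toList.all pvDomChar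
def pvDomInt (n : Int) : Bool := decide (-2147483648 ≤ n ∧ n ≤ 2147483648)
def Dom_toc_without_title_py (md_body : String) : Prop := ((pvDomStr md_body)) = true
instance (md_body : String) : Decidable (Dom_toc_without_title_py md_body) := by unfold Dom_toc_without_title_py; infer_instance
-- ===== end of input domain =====

-- B groups the stripped lines into maximal runs by the is-list predicate (groupby) and
-- returns the first True run, instead of A's flag-loop with break; objective: alternative.

-- ===== PORT A =====
-- ('*', '-', '+') + tuple(string.digits)
def tocAMarkers : List Char := ['*', '-', '+', '0', '1', '2', '3', '4', '5', '6', '7', '8', '9']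

-- the for-loop of A: state (tocs, toc_start); 'break' returns the accumulator
def tocALoop : List String → List String → Bool → List String
  | [], tocs, _ => tocs
  | l :: rest, tocs, started =>
    let line := PySem.Str.strip l
    if 0 < PySem.Str.len line && ((PySem.Str.pyGet? line 0).elim false tocAMarkers.contains) then
      tocALoop rest (tocs ++ [line]) true
    else if started then tocs
    else tocALoop rest tocs started

def toc_without_title_py (md_body : String) : String :=
  PySem.Str.strip (PySem.Str.join "\n" (tocALoop ((PySem.Str.split? md_body "\n").getD []) [] false))

-- ===== PORT B =====
-- line[0] in '*-+' + string.digits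
def bMarkers : String := "*-+0123456789"

def bIsList (line : String) : Bool :=
  0 < PySem.Str.len line && ((PySem.Str.pyGet? line 0).elim false bMarkers.toList.contains)

-- itertools.groupby(stripped, key=_is_list): maximal runs of equal key, in order
def bGroupBy : List String → List (Bool × List String)
  | [] => []
  | l :: rest =>
    (bIsList l, l :: rest.takeWhile (fun x => bIsList x == bIsList l))
      :: bGroupBy (rest.dropWhile (fun x => bIsList x == bIsList l))
termination_by ls => ls.length
decreasing_by
  simp only [List.length_cons]
  have := List.Sublist.length_le (List.dropWhile_sublist (l := rest) (p := fun x => bIsList x == bIsList l))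
  omega

-- the for-loop over the groups: return on the first True run
def bFirstTrue : List (Bool × List String) → String
  | [] => ""
  | (k, run) :: rest => if k then PySem.Str.strip (PySem.Str.join "\n" run) else bFirstTrue rest

def toc_without_title_py_alt (md_body : String) : String :=
  bFirstTrue (bGroupBy (((PySem.Str.split? md_body "\n").getD []).map PySem.Str.strip))

-- ===== PRECONDITION & SPEC =====
def Spec_toc_without_title_py (md_body : String) (out : String) : Prop := out = toc_without_title_py_alt md_body
instance (md_body : String) (out : String) : Decidable (Spec_toc_without_title_py md_body out) := by unfold Spec_toc_without_title_py; infer_instance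

-- ===== CLAIM (what is proved, stated in full; the proofs are below) =====
def Claim_equal_toc_without_title_py : Prop := ∀ (md_body : String), Dom_toc_without_title_py md_body → Spec_toc_without_title_py md_body (toc_without_title_py md_body)

-- ===== LEMMAS AND PROOFS =====

-- A's line test equals B's line test
lemma isList_eq (line : String) :
    (0 < PySem.Str.len line && ((PySem.Str.pyGet? line 0).elim false tocAMarkers.contains))
      = bIsList line := by
  have : bMarkers.toList = tocAMarkers := by decide
  simp [bIsList, this]

-- A's loop computes the contiguous run of stripped list lines
lemma tocALoop_true (ls : List String) (tocs : List String) :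
    tocALoop ls tocs true = tocs ++ (ls.map PySem.Str.strip).takeWhile bIsList := by
  induction ls generalizing tocs with
  | nil => simp [tocALoop]
  | cons l rest ih =>
    simp only [tocALoop, isList_eq, List.map_cons, List.takeWhile_cons]
    by_cases hb : bIsList (PySem.Str.strip l)
    · simp [hb, ih]
    · simp [hb]

lemma tocALoop_false (ls : List String) :
    tocALoop ls [] false
      = ((ls.map PySem.Str.strip).dropWhile (fun l => !bIsList l)).takeWhile bIsList := by
  induction ls with
  | nil => simp [tocALoop]
  | cons l rest ih =>
    simp only [tocALoop, isList_eq, List.map_cons, List.dropWhile_cons]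
    by_cases hb : bIsList (PySem.Str.strip l)
    · simp [hb, tocALoop_true]
    · simp [hb, ih]

lemma dropWhile_dropWhile (p : String → Bool) (l : List String) :
    (l.dropWhile p).dropWhile p = l.dropWhile p := by
  induction l with
  | nil => simp
  | cons a l ih => by_cases h : p a <;> simp [h, ih]

-- B's groupby-then-first-True computes the same run
lemma bFirstTrue_groupBy (ls : List String) :
    bFirstTrue (bGroupBy ls)
      = PySem.Str.strip (PySem.Str.join "\n"
          ((ls.dropWhile (fun l => !bIsList l)).takeWhile bIsList)) := by
  fun_induction bGroupBy ls with
  | case1 => decide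
  | case2 l rest ih =>
    by_cases hb : bIsList l
    · have hkey : (fun x => bIsList x == bIsList l) = bIsList := by
        funext x; simp [hb]
      simp [bFirstTrue, hb]
    · have hkey : (fun x => bIsList x == bIsList l) = (fun x => !bIsList x) := by
        funext x; simp [hb]
      rw [hkey] at ih
      rw [hkey]
      simp only [bFirstTrue, hb, List.dropWhile_cons, Bool.not_false, if_true, if_false,
        Bool.false_eq_true]
      rw [ih, dropWhile_dropWhile]

-- ===== VERDICT (by name: the statement is the Claim_ definition above) =====
theorem toc_without_title_py_spec : Claim_equal_toc_without_title_py := by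
  intro md _
  unfold Spec_toc_without_title_py toc_without_title_py toc_without_title_py_alt
  rw [tocALoop_false, bFirstTrue_groupBy]
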